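-- pv_equiv track=rewrite | github.com/hieudoanm/sandbox | packages/python.org/libraries/lodash/libs/array.py | sorted_last_index
-- ===== SOURCE A (Python) =====
-- def sorted_last_index(array, value):
--     """
--     sorted_last_index
--     """
--     index = -1
--     for idx, _ in enumerate(array):
--         if idx < len(array) - 1:
--             first = array[idx]
--             second = array[idx + 1]
--             if first <= value and value <= second:
--                 index = idx + 1
--         else:
--             idx = index + 1
--     return index
-- ===== SOURCE B (Python) =====
-- def sorted_last_index(array, value):
--     # Scan back-to-front and return the first (i.e. largest) index i >= 1
--     # whose adjacent pair brackets the value; -1 if no pair does.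
--     for i in range(len(array) - 1, 0, -1):
--         if array[i - 1] <= value <= array[i]:
--             return i
--     return -1
-- ===== Notes on version B (the rewrite author's own statement) =====
-- stated objective: alternative
-- what changed: B scans the array back-to-front and returns at the first bracketing adjacent pair (the largest index), instead of A's full forward pass that keeps overwriting an accumulator; B stops early where A always traverses the whole list.
import Mathlib
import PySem

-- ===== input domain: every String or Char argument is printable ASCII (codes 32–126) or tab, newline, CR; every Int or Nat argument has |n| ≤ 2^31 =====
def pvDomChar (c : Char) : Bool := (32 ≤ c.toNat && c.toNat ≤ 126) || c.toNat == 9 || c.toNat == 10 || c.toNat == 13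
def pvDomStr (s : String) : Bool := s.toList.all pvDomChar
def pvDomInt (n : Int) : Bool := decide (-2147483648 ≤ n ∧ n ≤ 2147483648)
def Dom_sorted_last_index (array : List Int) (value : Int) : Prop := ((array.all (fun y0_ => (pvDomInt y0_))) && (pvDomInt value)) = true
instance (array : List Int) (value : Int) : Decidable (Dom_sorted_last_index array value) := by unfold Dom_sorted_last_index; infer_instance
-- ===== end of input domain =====

-- B replaces A's full forward pass (accumulator overwritten at every bracketing pair)
-- by a back-to-front scan that returns at the first bracketing pair; same values everywhere.

-- ===== PORT A =====
-- for idx, _ in enumerate(array): …  (the 'else: idx = index + 1' branch only rebinds the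
-- loop variable and changes no state, so it is the identity on the accumulator).
-- array[idx] / array[idx+1] are only read under 'idx < len(array) - 1', where both indices
-- are in range, so pyGetD is exact there.
def sorted_last_index (array : List Int) (value : Int) : Int :=
  (PySem.List.enumerate array 0).foldl
    (fun index p =>
      if p.1 < (array.length : Int) - 1 then
        let first := PySem.List.pyGetD array p.1 0
        let second := PySem.List.pyGetD array (p.1 + 1) 0
        if first ≤ value ∧ value ≤ second then p.1 + 1 else index
      else
        index)
    (-1)

-- ===== PORT B =====
-- for i in range(len(array)-1, 0, -1): …  — structural countdown on the loop index;
-- altGo m visits i = m, m-1, …, 1 exactly as Source B's range does. Indices i-1, i are in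
-- range for 1 ≤ i ≤ len-1, so pyGetD is exact.
def altGo (array : List Int) (value : Int) : Nat → Int
  | 0 => -1
  | i + 1 =>
      if PySem.List.pyGetD array (i : Int) 0 ≤ value ∧ value ≤ PySem.List.pyGetD array ((i : Int) + 1) 0 then
        (i : Int) + 1
      else
        altGo array value i

def sorted_last_index_alt (array : List Int) (value : Int) : Int :=
  altGo array value (array.length - 1)

-- ===== PRECONDITION & SPEC =====
def Spec_sorted_last_index (array : List Int) (value : Int) (out : Int) : Prop := out = sorted_last_index_alt array value
instance (array : List Int) (value : Int) (out : Int) : Decidable (Spec_sorted_last_index array value out) := by unfold Spec_sorted_last_index; infer_instance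

-- ===== CLAIM (what is proved, stated in full; the proofs are below) =====
def Claim_equal_sorted_last_index : Prop := ∀ (array : List Int) (value : Int), Dom_sorted_last_index array value → Spec_sorted_last_index array value (sorted_last_index array value)

-- ===== LEMMAS AND PROOFS =====

-- A's loop body as a function of the accumulator and the (Int) loop index.
def stepA (array : List Int) (value : Int) (index : Int) (j : Int) : Int :=
  if j < (array.length : Int) - 1 then
    if PySem.List.pyGetD array j 0 ≤ value ∧ value ≤ PySem.List.pyGetD array (j + 1) 0 then j + 1 else index
  else index

-- A's fold restricted to the first m indices, as a Nat recursion.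
def prefA (array : List Int) (value : Int) : Nat → Int
  | 0 => -1
  | m + 1 => stepA array value (prefA array value m) (m : Int)

theorem foldl_range_stepA (array : List Int) (value : Int) (m : Nat) :
    (List.range m).foldl (fun acc (k : Nat) => stepA array value acc (k : Int)) (-1)
      = prefA array value m := by
  induction m with
  | zero => rfl
  | succ m ih => rw [List.range_succ, List.foldl_append]; simp [prefA, ih]

theorem A_eq_prefA (array : List Int) (value : Int) :
    sorted_last_index array value = prefA array value array.length := by
  unfold sorted_last_index
  rw [PySem.List.enumerate_eq_map_pyRange (d := 0), List.foldl_map,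
      PySem.List.pyRange_one, List.foldl_map]
  simp only [PySem.List.len_eq, Int.sub_zero, Int.toNat_natCast, Int.zero_add]
  rw [← foldl_range_stepA array value array.length]
  simp only [stepA]

theorem prefA_eq_altGo (array : List Int) (value : Int) (m : Nat)
    (hm : m ≤ array.length - 1) :
    prefA array value m = altGo array value m := by
  induction m with
  | zero => rfl
  | succ m ih =>
    have hlen : (m : Int) < (array.length : Int) - 1 := by omega
    simp only [prefA, altGo, stepA, if_pos hlen]
    split
    · rfl
    · exact ih (by omega)

theorem A_eq_B (array : List Int) (value : Int) :
    sorted_last_index array value = sorted_last_index_alt array value := by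
  rw [A_eq_prefA]
  unfold sorted_last_index_alt
  rcases Nat.eq_zero_or_eq_succ_pred array.length with h | h
  · rw [h]; rfl
  · rw [h]
    have hguard : ¬ ((array.length - 1 : Nat) : Int) < (array.length : Int) - 1 := by omega
    calc prefA array value (array.length - 1 + 1)
        = prefA array value (array.length - 1) := by
          simp only [prefA, stepA]
          rw [if_neg (by omega : ¬ (((array.length - 1 : Nat) : Int)) < (array.length : Int) - 1)]
      _ = altGo array value (array.length - 1) := prefA_eq_altGo array value _ (le_refl _)

-- ===== VERDICT (by name: the statement is the Claim_ definition above) =====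
theorem sorted_last_index_spec : Claim_equal_sorted_last_index := by
  intro array value _
  exact A_eq_B array value
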